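-- pv_equiv track=rewrite | github.com/yohhaan/topics_analysis | simulator/simulator_library.py | reidentify_user_function_pool
-- ===== SOURCE A (Python) =====
-- def reidentify_user_function_pool(one_user_view, user_id, reid_dict):
--     """compare view to shared dictionary"""
--     candidates = {}
--     for t in one_user_view:
--         for user_b_id in reid_dict[t]:
--             if user_b_id in candidates.keys():
--                 candidates[user_b_id] += 1
--             else:
--                 candidates[user_b_id] = 1
--
--     keys = list(candidates.keys())
--     values = list(candidates.values())
--
--     if len(values) == 0:
--         candidates_ids = []
--     else:
--         indices = [0]
--         max_value = values[0]
--         for i in range(1, len(values)):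
--             if values[i] > max_value:
--                 indices = [i]
--                 max_value = values[i]
--             elif values[i] == max_value:
--                 indices.append(i)
--         candidates_ids = [keys[i] for i in indices]
--
--     # 0 means unsuccessfull, 1, means unique in your group (uniquely
--     # re-identified!), higher values indicate that user is in a bigger group
--     # (k-anonymity)
--     if user_id not in candidates_ids:
--         return 0
--     else:
--         return len(candidates_ids)
-- ===== SOURCE B (Python) =====
-- def reidentify_user_function_pool(one_user_view, user_id, reid_dict):
--     """compare view to shared dictionary"""
--     pool = []
--     for t in one_user_view:
--         pool += reid_dict[t]
--
--     c = pool.count(user_id)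
--     if c == 0:
--         return 0
--     m = 0
--     for x in pool:
--         k = pool.count(x)
--         if k > m:
--             m = k
--     if c < m:
--         return 0
--     n = 0
--     seen = []
--     for x in pool:
--         if x not in seen:
--             seen.append(x)
--             if pool.count(x) == m:
--                 n += 1
--     return n
-- ===== Notes on version B (the rewrite author's own statement) =====
-- stated objective: alternative
-- what changed: B drops the candidates dict and the argmax-index tracking entirely: it flattens all matches into one pool list and works by repeated pool.count() - user_id's count versus the running maximum of element counts, then counts distinct max-count ids with a first-occurrence seen list.
import Mathlib
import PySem

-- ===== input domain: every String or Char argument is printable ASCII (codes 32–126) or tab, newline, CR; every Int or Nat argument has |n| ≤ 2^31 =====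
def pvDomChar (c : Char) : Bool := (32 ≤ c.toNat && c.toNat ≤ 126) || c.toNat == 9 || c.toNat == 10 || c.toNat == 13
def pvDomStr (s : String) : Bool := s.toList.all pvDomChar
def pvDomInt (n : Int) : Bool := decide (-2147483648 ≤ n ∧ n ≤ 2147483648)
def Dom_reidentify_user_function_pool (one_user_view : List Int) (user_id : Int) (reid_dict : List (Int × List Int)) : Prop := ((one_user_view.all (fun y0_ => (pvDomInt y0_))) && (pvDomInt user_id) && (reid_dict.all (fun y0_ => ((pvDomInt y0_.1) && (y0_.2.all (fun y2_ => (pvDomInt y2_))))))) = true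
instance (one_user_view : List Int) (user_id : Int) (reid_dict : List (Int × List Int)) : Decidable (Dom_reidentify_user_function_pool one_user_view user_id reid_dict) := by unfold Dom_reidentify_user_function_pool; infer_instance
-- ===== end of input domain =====

-- B replaces A's candidates dict and argmax-index tracking by a flattened pool list
-- decided via repeated pool.count() against user_id's count and the maximum (objective: alternative).


-- ===== PORT A =====
-- reid_dict[t]: first-match lookup; Pre_ excludes the KeyError case, so the [] default is never taken
def pvReidLookup (reid_dict : List (Int × List Int)) (t : Int) : List Int :=
  ((PySem.Dict.mk reid_dict).get? t).getD []

def reidentify_user_function_pool (one_user_view : List Int) (user_id : Int) (reid_dict : List (Int × List Int)) : Int :=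
  let candidates : PySem.Dict Int Int :=
    one_user_view.foldl (fun d t =>
      (pvReidLookup reid_dict t).foldl (fun d u =>
        if d.contains u then d.insert u (d.getD u 0 + 1) else d.insert u 1) d)
      PySem.Dict.empty
  let keys := candidates.keys
  let values := candidates.values
  let candidates_ids : List Int :=
    if values.length = 0 then []
    else
      let max_value := PySem.List.pyGetD values 0 0
      let st := (PySem.List.pyRange 1 (values.length : Int) 1).foldl
        (fun (st : List Int × Int) i =>
          let v := PySem.List.pyGetD values i 0
          if v > st.2 then ([i], v)
          else if v = st.2 then (st.1 ++ [i], st.2)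
          else st) ([0], max_value)
      st.1.map (fun i => PySem.List.pyGetD keys i 0)
  if user_id ∉ candidates_ids then 0 else (candidates_ids.length : Int)

-- ===== PORT B =====
def reidentify_user_function_pool_alt (one_user_view : List Int) (user_id : Int) (reid_dict : List (Int × List Int)) : Int :=
  let pool : List Int := one_user_view.foldl (fun p t => p ++ pvReidLookup reid_dict t) []
  let c : Int := (pool.count user_id : Int)
  if c = 0 then 0
  else
    let m : Int := pool.foldl (fun m x =>
      let k : Int := (pool.count x : Int)
      if k > m then k else m) 0
    if c < m then 0
    else
      (pool.foldl (fun (st : Int × List Int) x =>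
        if x ∈ st.2 then st
        else (if (pool.count x : Int) = m then st.1 + 1 else st.1, st.2 ++ [x]))
        ((0 : Int), ([] : List Int))).1

-- ===== PRECONDITION & SPEC =====
-- Pre_ excludes exactly the inputs on which Python A raises KeyError: a view entry absent from reid_dict.
def Pre_reidentify_user_function_pool (one_user_view : List Int) (user_id : Int) (reid_dict : List (Int × List Int)) : Prop :=
  ∀ t ∈ one_user_view, t ∈ reid_dict.map Prod.fst
instance (one_user_view : List Int) (user_id : Int) (reid_dict : List (Int × List Int)) : Decidable (Pre_reidentify_user_function_pool one_user_view user_id reid_dict) := by unfold Pre_reidentify_user_function_pool; infer_instance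

def pvWitness_reidentify_user_function_pool : List Int × Int × (List (Int × List Int)) :=
  ([1, 2, 1], 5, [(1, [5, 6]), (2, [5])])

def Spec_reidentify_user_function_pool (one_user_view : List Int) (user_id : Int) (reid_dict : List (Int × List Int)) (out : Int) : Prop := out = reidentify_user_function_pool_alt one_user_view user_id reid_dict
instance (one_user_view : List Int) (user_id : Int) (reid_dict : List (Int × List Int)) (out : Int) : Decidable (Spec_reidentify_user_function_pool one_user_view user_id reid_dict out) := by unfold Spec_reidentify_user_function_pool; infer_instance

-- ===== CLAIM (what is proved, stated in full; the proofs are below) =====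
def Claim_equal_reidentify_user_function_pool : Prop := ∀ (one_user_view : List Int) (user_id : Int) (reid_dict : List (Int × List Int)), Dom_reidentify_user_function_pool one_user_view user_id reid_dict → Pre_reidentify_user_function_pool one_user_view user_id reid_dict → Spec_reidentify_user_function_pool one_user_view user_id reid_dict (reidentify_user_function_pool one_user_view user_id reid_dict)

-- ===== LEMMAS AND PROOFS =====

-- A's argmax loop over parallel keys/values lists, characterized on an arbitrary items list
def pvMaxPref (items : List (Int × Int)) (n : Nat) : Int :=
  ((items.take n).map Prod.snd).foldl max (PySem.List.pyGetD (items.map Prod.snd) 0 0)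

def pvCids (d : PySem.Dict Int Int) : List Int :=
  if d.values.length = 0 then []
  else
    ((PySem.List.pyRange 1 (d.values.length : Int) 1).foldl
      (fun (st : List Int × Int) i =>
        let v := PySem.List.pyGetD d.values i 0
        if v > st.2 then ([i], v) else if v = st.2 then (st.1 ++ [i], st.2) else st)
      ([0], PySem.List.pyGetD d.values 0 0)).1.map
      (fun i => PySem.List.pyGetD d.keys i 0)

lemma pv_loop_inv (items : List (Int × Int)) (n : Nat) (hn : 1 ≤ n) (hlen : n ≤ items.length) :
    ((PySem.List.pyRange 1 (n : Int) 1).foldl (fun (st : List Int × Int) i =>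
        let v := PySem.List.pyGetD (items.map Prod.snd) i 0
        if v > st.2 then ([i], v) else if v = st.2 then (st.1 ++ [i], st.2) else st)
      ([0], PySem.List.pyGetD (items.map Prod.snd) 0 0)).2 = pvMaxPref items n
  ∧ ((PySem.List.pyRange 1 (n : Int) 1).foldl (fun (st : List Int × Int) i =>
        let v := PySem.List.pyGetD (items.map Prod.snd) i 0
        if v > st.2 then ([i], v) else if v = st.2 then (st.1 ++ [i], st.2) else st)
      ([0], PySem.List.pyGetD (items.map Prod.snd) 0 0)).1.map
        (fun i => PySem.List.pyGetD (items.map Prod.fst) i 0)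
      = ((items.take n).filter (fun p => p.2 == pvMaxPref items n)).map Prod.fst := by
  induction n with
  | zero => omega
  | succ n ih =>
    rcases n.eq_zero_or_pos with h1 | h1
    · subst h1
      obtain ⟨p, rest, rfl⟩ : ∃ p rest, items = p :: rest := by
        cases items with
        | nil => simp at hlen
        | cons p rest => exact ⟨p, rest, rfl⟩
      have hr : PySem.List.pyRange 1 ((1:Nat) : Int) 1 = [] := by norm_num [PySem.List.pyRange]
      rw [hr]
      simp [pvMaxPref, PySem.List.pyGetD]
    · -- n ≥ 1
      have hnlt : n < items.length := by omega
      have hcast : (((n+1:Nat)) : Int) = (n : Int) + 1 := by push_cast; ring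
      have hr : PySem.List.pyRange 1 (((n+1:Nat)) : Int) 1
          = PySem.List.pyRange 1 (n : Int) 1 ++ [(n : Int)] := by
        rw [hcast, PySem.List.pyRange_one_succ_right (by exact_mod_cast h1)]
      obtain ⟨ihM, ihL⟩ := ih h1 (by omega)
      have hv : PySem.List.pyGetD (items.map Prod.snd) ((n : Nat) : Int) 0 = items[n].2 := by
        rw [PySem.List.pyGetD_natCast]
        simp [List.getD_eq_getElem?_getD, List.getElem?_eq_getElem (by simpa using hnlt)]
      have hk : PySem.List.pyGetD (items.map Prod.fst) ((n : Nat) : Int) 0 = items[n].1 := by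
        rw [PySem.List.pyGetD_natCast]
        simp [List.getD_eq_getElem?_getD, List.getElem?_eq_getElem (by simpa using hnlt)]
      have htake : items.take (n+1) = items.take n ++ [items[n]] := by
        rw [List.take_add_one, List.getElem?_eq_getElem hnlt]; rfl
      have hM : pvMaxPref items (n+1) = max (pvMaxPref items n) items[n].2 := by
        unfold pvMaxPref
        rw [htake, List.map_append, List.foldl_append]
        rfl
      have hbound : ∀ p ∈ items.take n, p.2 ≤ pvMaxPref items n := by
        intro p hp
        unfold pvMaxPref
        exact (PySem.List.le_foldl_max _ _).2 _ (List.mem_map_of_mem hp)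
      rw [hr, List.foldl_append]
      simp only [List.foldl_cons, List.foldl_nil]
      rw [hv]
      rcases lt_trichotomy (pvMaxPref items n) (items[n].2) with hc | hc | hc
      · -- new max
        rw [if_pos (by rw [ihM]; exact hc)]
        have hM' : pvMaxPref items (n+1) = items[n].2 := by rw [hM]; exact max_eq_right hc.le
        constructor
        · exact hM'.symm
        · simp only [List.map_cons, List.map_nil, hk, hM', htake, List.filter_append]
          have hfe : (items.take n).filter (fun p => p.2 == items[n].2) = [] := by
            rw [List.filter_eq_nil_iff]
            intro p hp
            have := hbound p hp
            simp only [beq_iff_eq]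
            intro he; omega
          simp [hfe]
      · -- equal
        rw [if_neg (by rw [ihM]; omega), if_pos (by rw [ihM]; omega)]
        have hM' : pvMaxPref items (n+1) = pvMaxPref items n := by rw [hM, hc]; simp
        constructor
        · rw [ihM, hM']
        · rw [List.map_append, ihL, hM']
          simp only [List.map_cons, List.map_nil, hk, htake, List.filter_append]
          have : items[n].2 == pvMaxPref items n := by simp [← hc]
          simp [this]
      · -- smaller
        rw [if_neg (by rw [ihM]; omega), if_neg (by rw [ihM]; omega)]
        have hM' : pvMaxPref items (n+1) = pvMaxPref items n := by rw [hM]; exact max_eq_left hc.le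
        constructor
        · rw [ihM, hM']
        · rw [ihL, hM']
          rw [htake, List.filter_append]
          have : (([items[n]]).filter (fun p => p.2 == pvMaxPref items n)) = [] := by
            simp only [List.filter_cons, List.filter_nil]
            have : ¬ (items[n].2 == pvMaxPref items n) = true := by simp; omega
            simp [this]
          simp [this]

lemma pv_cids_char (d : PySem.Dict Int Int) (h : d.items ≠ []) :
    pvCids d = (d.items.filter (fun p => p.2 == pvMaxPref d.items d.items.length)).map Prod.fst := by
  obtain ⟨L⟩ := d
  have hval : (PySem.Dict.mk L).values = L.map Prod.snd := by simp [PySem.Dict.values]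
  have hkey : (PySem.Dict.mk L).keys = L.map Prod.fst := by simp [PySem.Dict.keys]
  have hitems : (PySem.Dict.mk L).items = L := rfl
  have hLne : L ≠ [] := by simpa [hitems] using h
  have hpos : 1 ≤ L.length := by
    cases L with
    | nil => exact absurd rfl hLne
    | cons a t => simp
  have hne : ¬ ((PySem.Dict.mk L).values.length = 0) := by
    simp [hval]; exact hLne
  have hloop := pv_loop_inv L L.length hpos le_rfl
  have hlen : (L.map Prod.snd).length = L.length := by simp
  rw [pvCids, if_neg hne]
  simp only [hval, hkey, hlen, hitems]
  rw [hloop.2, List.take_length]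

-- A's nested counting loop flattened: fold over the concatenation of the lookups
lemma pv_flat {β : Type} (view : List Int) (g : Int → List Int)
    (f : β → Int → β) (d : β) :
    view.foldl (fun d t => (g t).foldl f d) d = (view.flatMap g).foldl f d := by
  induction view generalizing d with
  | nil => rfl
  | cons t view ih => simp only [List.foldl_cons, List.flatMap_cons, List.foldl_append, ih]

-- A's contains-branch insert loop is the plain counter update
lemma pv_counters_eq (view : List Int) (rd : List (Int × List Int)) :
    view.foldl (fun (d : PySem.Dict Int Int) t => (pvReidLookup rd t).foldl
        (fun d u => if d.contains u then d.insert u (d.getD u 0 + 1) else d.insert u 1) d)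
      PySem.Dict.empty
    = view.foldl (fun (d : PySem.Dict Int Int) t => (pvReidLookup rd t).foldl
        (fun d u => d.insert u (d.getD u 0 + 1)) d)
      PySem.Dict.empty := by
  apply PySem.List.foldl_congr_mem
  intro acc t _
  apply PySem.List.foldl_congr_mem
  intro d u _
  by_cases h : d.contains u = true
  · simp [h]
  · have hc : d.contains u = false := by simpa using h
    rw [if_neg (by simp [hc]), PySem.Dict.getD_of_not_contains d 0 hc]
    norm_num

lemma pv_foldl_max_zero_eq (l1 l2 : List Int) (h : ∀ y, y ∈ l1 ↔ y ∈ l2) :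
    l1.foldl max 0 = l2.foldl max 0 := by
  have le : ∀ (a b : List Int), (∀ y ∈ a, y ∈ b) → a.foldl max 0 ≤ b.foldl max 0 := by
    intro a b hab
    rcases PySem.List.foldl_max_mem a 0 with h0 | hm
    · rw [h0]; exact (PySem.List.le_foldl_max b 0).1
    · exact (PySem.List.le_foldl_max b 0).2 _ (hab _ hm)
  exact le_antisymm (le _ _ fun y hy => (h y).1 hy) (le _ _ fun y hy => (h y).2 hy)

-- B's last loop: first-occurrence seen list + conditional increment
lemma pv_seen_inv (p : Int → Prop) [DecidablePred p] (L : List Int) (s : List Int) (n : Int) :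
    L.foldl (fun (st : Int × List Int) x =>
        if x ∈ st.2 then st
        else (if p x then st.1 + 1 else st.1, st.2 ++ [x])) (n, s)
      = (n + (((L.foldl (fun s x => if x ∈ s then s else s ++ [x]) s).filter
              (fun x => decide (p x))).length : Int)
           - ((s.filter (fun x => decide (p x))).length : Int),
         L.foldl (fun s x => if x ∈ s then s else s ++ [x]) s) := by
  induction L generalizing s n with
  | nil => simp
  | cons x L ih =>
    by_cases hx : x ∈ s
    · simp only [List.foldl_cons, if_pos hx]
      exact ih s n
    · simp only [List.foldl_cons, if_neg hx]
      rw [ih]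
      have hlen : (((s ++ [x]).filter (fun y => decide (p y))).length : Int)
          = ((s.filter (fun y => decide (p y))).length : Int) + (if p x then 1 else 0) := by
        rw [List.filter_append]
        by_cases hp : p x <;> simp [hp]
      by_cases hp : p x <;> simp only [if_pos, if_neg, hp, if_true, if_false] <;>
        · refine Prod.ext ?_ rfl
          simp only [hlen, hp, if_true, if_false]
          push_cast
          ring

-- the seen-update fold builds set(pool)
lemma pv_seen_is_ofList (L : List Int) (s : List Int) :
    L.foldl (fun s x => if x ∈ s then s else s ++ [x]) s
      = L.foldl (fun s x => PySem.Set.add s x) s := by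
  apply PySem.List.foldl_congr_mem
  intro acc x _
  rw [PySem.Set.add_eq_ite]

-- B's tail on the flattened pool (proof helper mirroring reidentify_user_function_pool_alt)
def pvBTail (pool : List Int) (uid : Int) : Int :=
  let c : Int := (pool.count uid : Int)
  if c = 0 then 0
  else
    let m : Int := pool.foldl (fun m x =>
      let k : Int := (pool.count x : Int)
      if k > m then k else m) 0
    if c < m then 0
    else
      (pool.foldl (fun (st : Int × List Int) x =>
        if x ∈ st.2 then st
        else (if (pool.count x : Int) = m then st.1 + 1 else st.1, st.2 ++ [x]))
        ((0 : Int), ([] : List Int))).1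

lemma pv_main (L : List Int) (uid : Int) :
    (if uid ∉ pvCids (PySem.Dict.counter L) then (0:Int)
     else ((pvCids (PySem.Dict.counter L)).length : Int)) = pvBTail L uid := by
  cases L with
  | nil =>
    have h1 : pvCids (PySem.Dict.counter ([] : List Int)) = [] := rfl
    have h2 : pvBTail [] uid = 0 := rfl
    rw [h1, h2]
    simp
  | cons x L' =>
    set P : List Int := x :: L' with hP
    set cnt : Int → Int := fun k => (P.count k : Int) with hcnt
    set D : List Int := PySem.Set.ofList P with hD
    have hxD : x ∈ D := by rw [hD]; exact (PySem.Set.mem_ofList _ _).2 (by simp [hP])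
    obtain ⟨k0, Dr, hDsplit⟩ : ∃ k0 Dr, D = k0 :: Dr := by
      cases hDc : D with
      | nil => rw [hDc] at hxD; exact absurd hxD (List.not_mem_nil)
      | cons a t => exact ⟨a, t, rfl⟩
    have hitems : (PySem.Dict.counter P).items = D.map (fun k => (k, cnt k)) := by
      rw [hD, hcnt]
      exact PySem.Dict.items_counter P
    have hitemsne : (PySem.Dict.counter P).items ≠ [] := by
      rw [hitems, hDsplit]; simp
    -- membership in D = membership in P
    have hmemDP : ∀ y : Int, y ∈ D ↔ y ∈ P := by
      intro y; rw [hD]; exact PySem.Set.mem_ofList _ _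
    have hcnt_pos : ∀ k ∈ D, 1 ≤ cnt k := by
      intro k hk
      have : 0 < P.count k := List.count_pos_iff.2 ((hmemDP k).1 hk)
      simp only [hcnt]
      exact_mod_cast this
    -- the maximum A computes
    set M : Int := pvMaxPref (PySem.Dict.counter P).items (PySem.Dict.counter P).items.length with hM
    set m : Int := P.foldl (fun m x =>
      let k : Int := (P.count x : Int)
      if k > m then k else m) 0 with hm
    have hmmax : m = (P.map cnt).foldl max 0 := by
      rw [hm, List.foldl_map]
      apply PySem.List.foldl_congr_mem
      intro acc y _
      simp only [hcnt]
      rw [max_def]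
      split_ifs <;> omega
    have hMmax : M = (D.map cnt).foldl max 0 := by
      have hsnd : (PySem.Dict.counter P).items.map Prod.snd = D.map cnt := by
        rw [hitems, List.map_map]; rfl
      rw [hM, pvMaxPref, List.take_length, hsnd, hDsplit]
      simp only [List.map_cons, PySem.List.pyGetD_ofNat', List.getD_cons_zero, List.foldl_cons]
      have h0 : max (0:Int) (cnt k0) = cnt k0 :=
        max_eq_right (le_trans (by norm_num) (hcnt_pos k0 (by rw [hDsplit]; simp)))
      rw [max_self, h0]
    have hMm : M = m := by
      rw [hMmax, hmmax]
      apply pv_foldl_max_zero_eq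
      intro y
      simp only [List.mem_map]
      constructor
      · rintro ⟨k, hk, rfl⟩; exact ⟨k, (hmemDP k).1 hk, rfl⟩
      · rintro ⟨k, hk, rfl⟩; exact ⟨k, (hmemDP k).2 hk, rfl⟩
    -- A's candidate list
    have hcids : pvCids (PySem.Dict.counter P) = D.filter (fun k => cnt k == M) := by
      rw [pv_cids_char _ hitemsne, ← hM, hitems, List.filter_map, List.map_map]
      have : (Prod.fst ∘ fun k => (k, cnt k)) = id := rfl
      rw [this, List.map_id]
      rfl
    by_cases hc0 : cnt uid = 0
    · -- user absent from the pool: both 0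
      have huidP : uid ∉ P := by
        rw [← List.count_eq_zero]
        simp only [hcnt] at hc0
        exact_mod_cast hc0
      have hnotin : uid ∉ pvCids (PySem.Dict.counter P) := by
        rw [hcids]
        intro hmem
        exact huidP ((hmemDP uid).1 (List.mem_of_mem_filter hmem))
      rw [if_pos hnotin]
      show 0 = pvBTail P uid
      simp only [pvBTail]
      rw [if_pos (by simpa [hcnt] using hc0)]
    · have huidP : uid ∈ P := by
        by_contra h
        exact hc0 (by simp [hcnt, List.count_eq_zero.2 h])
      have huidD : uid ∈ D := (hmemDP uid).2 huidP
      have hcle : cnt uid ≤ m := by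
        rw [hmmax]
        exact (PySem.List.le_foldl_max _ _).2 _ (List.mem_map_of_mem huidP)
      by_cases hlt : cnt uid < m
      · -- below the maximum: both 0
        have hnotin : uid ∉ pvCids (PySem.Dict.counter P) := by
          rw [hcids]
          intro hmem
          have := List.of_mem_filter hmem
          rw [beq_iff_eq] at this
          rw [this, hMm] at hlt
          omega
        rw [if_pos hnotin]
        show 0 = pvBTail P uid
        simp only [pvBTail]
        rw [if_neg (by simpa [hcnt] using hc0), ← hm, if_pos (by simpa [hcnt] using hlt)]
      · -- at the maximum: A returns the count of argmax ids, so does B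
        have hceq : cnt uid = m := le_antisymm hcle (by omega)
        have hin : uid ∈ pvCids (PySem.Dict.counter P) := by
          rw [hcids]
          exact List.mem_filter.2 ⟨huidD, by rw [beq_iff_eq, hceq, hMm]⟩
        rw [if_neg (by simp [hin])]
        show ((pvCids (PySem.Dict.counter P)).length : Int) = pvBTail P uid
        simp only [pvBTail]
        rw [if_neg (by simpa [hcnt] using hc0), ← hm, if_neg (by simpa [hcnt] using hlt)]
        rw [pv_seen_inv (p := fun y => (P.count y : Int) = m) P [] 0]
        have hseen : P.foldl (fun s y => if y ∈ s then s else s ++ [y]) ([] : List Int) = D := by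
          rw [pv_seen_is_ofList, hD, PySem.Set.ofList_eq_foldl]
        simp only [hseen, List.filter_nil, List.length_nil]
        rw [hcids]
        have hfe : (fun k => cnt k == M) = (fun y => decide ((P.count y : Int) = m)) := by
          funext k
          rw [hMm]
          rfl
        rw [hfe]
        push_cast
        ring

-- ===== VERDICT (by name: the statement is the Claim_ definition above) =====
theorem reidentify_user_function_pool_spec : Claim_equal_reidentify_user_function_pool := by
  intro view uid rd _ _
  show reidentify_user_function_pool view uid rd = reidentify_user_function_pool_alt view uid rd
  have hA : reidentify_user_function_pool view uid rd
      = (if uid ∉ pvCids (view.foldl (fun d t => (pvReidLookup rd t).foldl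
            (fun d u => if d.contains u then d.insert u (d.getD u 0 + 1) else d.insert u 1) d)
          PySem.Dict.empty) then (0:Int)
        else ((pvCids (view.foldl (fun d t => (pvReidLookup rd t).foldl
            (fun d u => if d.contains u then d.insert u (d.getD u 0 + 1) else d.insert u 1) d)
          PySem.Dict.empty)).length : Int)) := rfl
  have hB : reidentify_user_function_pool_alt view uid rd
      = pvBTail (view.foldl (fun p t => p ++ pvReidLookup rd t) []) uid := rfl
  have hpool : view.foldl (fun p t => p ++ pvReidLookup rd t) ([] : List Int)
      = view.flatMap (pvReidLookup rd) := by
    rw [PySem.List.foldl_append_eq_flatMap]; rfl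
  have hd : view.foldl (fun d t => (pvReidLookup rd t).foldl
        (fun d u => if d.contains u then d.insert u (d.getD u 0 + 1) else d.insert u 1) d)
      PySem.Dict.empty
      = PySem.Dict.counter (view.flatMap (pvReidLookup rd)) := by
    rw [pv_counters_eq, pv_flat]
    exact PySem.Dict.foldl_insert_getD_add_one_eq_counter _
  rw [hA, hB, hpool, hd]
  exact pv_main _ uid
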